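-- pv_equiv track=rewrite | github.com/Al-tekreeti/dataStructures_and_algorithms | meta.py | findMinArray
-- ===== SOURCE A (Python) =====
-- def findMinArray(arr, k):
--   # Write your code here
--   sorted_arr = sorted(arr)
--   index_dict = {}
--   for i in range(len(arr)):
--     if arr[i] not in index_dict:
--       index_dict[arr[i]] = i
--
--   index = None
--   for elem in sorted_arr:
--     if index_dict[elem] <= k:
--       index = index_dict[elem]
--       break
--
--   """
--   index = None
--   for j in range(1, len(arr) + 1):
--     elem = search_kth_smallest(arr, j)
--     if index_dict[elem] <= k:
--       index = index_dict[elem]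
--       break
--   """
--   while index > 0:
--     arr[index-1], arr[index] = arr[index], arr[index-1]
--     index -= 1
--
--   return arr
-- ===== SOURCE B (Python) =====
-- # Equivalence is about the RETURN value only: A mutates arr in place; B builds a new list.
-- def findMinArray(arr, k):
--   prefix = arr[:k+1]
--   i = prefix.index(min(prefix))
--   return [arr[i]] + arr[:i] + arr[i+1:]
-- ===== Notes on version B (the rewrite author's own statement) =====
-- stated objective: faster
-- what changed: Replaces sort + first-index dict + adjacent-swap bubbling by a single scan of the first k+1 elements for the minimum and its first index, then builds the rotated prefix directly.
import Mathlib
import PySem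

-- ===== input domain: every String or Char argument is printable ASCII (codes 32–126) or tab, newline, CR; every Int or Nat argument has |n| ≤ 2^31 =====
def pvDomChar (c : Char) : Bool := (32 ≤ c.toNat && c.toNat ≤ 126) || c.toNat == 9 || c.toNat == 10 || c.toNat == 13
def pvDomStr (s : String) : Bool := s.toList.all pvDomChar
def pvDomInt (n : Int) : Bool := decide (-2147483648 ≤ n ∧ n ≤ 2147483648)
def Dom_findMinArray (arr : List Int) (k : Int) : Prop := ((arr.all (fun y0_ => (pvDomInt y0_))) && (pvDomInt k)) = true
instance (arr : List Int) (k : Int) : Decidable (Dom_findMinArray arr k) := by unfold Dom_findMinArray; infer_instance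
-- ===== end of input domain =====

-- B replaces A's sort + first-index dict + adjacent-swap bubbling by one scan of the first k+1
-- elements and a direct rebuild (faster); A mutates arr in place, so the equivalence is about the
-- RETURN value only (B builds a new list).

-- ===== PORT A =====
-- 'for elem in sorted_arr: if index_dict[elem] <= k: index = index_dict[elem]; break'
def pvFindLoop (l : List Int) (d : PySem.Dict Int Int) (k : Int) : Option Int :=
  match l with
  | [] => none
  | e :: t =>
    match d.get? e with
    | none => none          -- index_dict[elem] would raise KeyError (never reached: every elem is a key)
    | some j => if j ≤ k then some j else pvFindLoop t d k

-- the while-body: arr[index-1], arr[index] = arr[index], arr[index-1]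
def pvSwapStep (l : List Int) (i : Int) : List Int :=
  let x := PySem.List.pyGetD l i 0
  let y := PySem.List.pyGetD l (i - 1) 0
  PySem.List.pySetD (PySem.List.pySetD l (i - 1) x) i y

-- 'while index > 0: …; index -= 1'  (index ≥ 0, so the remaining iteration count is index.toNat)
def pvBubble (l : List Int) (i : Nat) : List Int :=
  match i with
  | 0 => l
  | Nat.succ m => pvBubble (pvSwapStep l ((Nat.succ m : Nat) : Int)) m

def findMinArray (arr : List Int) (k : Int) : List Int :=
  let sortedArr := PySem.List.sorted arr (fun x => x) false
  let indexDict := (PySem.List.pyRange 0 (PySem.List.len arr) 1).foldl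
      (fun d i => if d.contains (PySem.List.pyGetD arr i 0) then d
                  else d.insert (PySem.List.pyGetD arr i 0) i) PySem.Dict.empty
  match pvFindLoop sortedArr indexDict k with
  | none => arr            -- Python: 'while None > 0' raises TypeError; excluded by Pre_
  | some i => pvBubble arr i.toNat

-- ===== PORT B =====
def findMinArray_alt (arr : List Int) (k : Int) : List Int :=
  let pre := PySem.List.slice arr none (some (k + 1))
  match PySem.List.min? pre (fun x => x) with
  | none => arr            -- min([]) raises ValueError; excluded by Pre_
  | some m =>
    match PySem.List.index? pre m with
    | none => arr          -- never reached: the minimum is in pre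
    | some i =>
      PySem.List.pyGetD arr (i : Int) 0 ::
        (PySem.List.slice arr none (some (i : Int)) ++
         PySem.List.slice arr (some ((i : Int) + 1)) none)

-- ===== PRECONDITION & SPEC =====
-- Pre_ excludes exactly the inputs on which A raises: the empty list and negative k
-- ('while None > 0' raises TypeError there).
def Pre_findMinArray (arr : List Int) (k : Int) : Prop := arr ≠ [] ∧ 0 ≤ k
instance (arr : List Int) (k : Int) : Decidable (Pre_findMinArray arr k) := by
  unfold Pre_findMinArray; infer_instance
def pvWitness_findMinArray : List Int × Int := ([3, 1, 2], 1)

def Spec_findMinArray (arr : List Int) (k : Int) (out : List Int) : Prop := out = findMinArray_alt arr k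
instance (arr : List Int) (k : Int) (out : List Int) : Decidable (Spec_findMinArray arr k out) := by unfold Spec_findMinArray; infer_instance

-- ===== CLAIM (what is proved, stated in full; the proofs are below) =====
def Claim_equal_findMinArray : Prop := ∀ (arr : List Int) (k : Int), Dom_findMinArray arr k → Pre_findMinArray arr k → Spec_findMinArray arr k (findMinArray arr k)

-- ===== LEMMAS AND PROOFS =====

-- The index-dict build loop: looking up v afterwards yields v's first index (offset by the
-- enumeration start), unless v was already a key.
lemma pvDict_fold_get? (xs : List Int) (v : Int) : ∀ (s : Int) (d : PySem.Dict Int Int),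
    ((PySem.List.enumerate xs s).foldl
        (fun d p => if d.contains p.2 then d else d.insert p.2 p.1) d).get? v =
      match d.get? v with
      | some j => some j
      | none => (PySem.List.index? xs v).map (fun n => s + (n : Int)) := by
  induction xs with
  | nil =>
    intro s d
    rw [PySem.List.enumerate_nil, List.foldl_nil]
    cases d.get? v <;> rfl
  | cons x t ih =>
    intro s d
    rw [PySem.List.enumerate_cons, List.foldl_cons, ih]
    by_cases hxv : x = v
    · subst hxv
      cases hd : d.get? x with
      | some j =>
        have hc : d.contains x = true := by
          rw [PySem.Dict.contains_eq_isSome_get?, hd]; rfl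
        simp only [hc, if_true, hd]
      | none =>
        have hc : d.contains x = false := by
          rw [PySem.Dict.contains_eq_isSome_get?, hd]; rfl
        simp only [hc, Bool.false_eq_true, if_false, PySem.Dict.get?_insert_self,
          PySem.List.index?_cons_self]
        norm_num
    · have h1 : (if d.contains x then d else d.insert x s).get? v = d.get? v := by
        split
        · rfl
        · exact PySem.Dict.get?_insert_of_ne d s (Ne.symm hxv)
      rw [h1, PySem.List.index?_cons_of_ne t hxv]
      cases d.get? v with
      | some j => rfl
      | none =>
        cases PySem.List.index? t v with
        | none => rfl
        | some n =>
          simp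
          ring

-- A's dict, as built by the port's pyRange fold: lookup of v is v's first index in arr.
lemma pvDict_get? (arr : List Int) (v : Int) :
    ((PySem.List.pyRange 0 (PySem.List.len arr) 1).foldl
      (fun d i => if d.contains (PySem.List.pyGetD arr i 0) then d
                  else d.insert (PySem.List.pyGetD arr i 0) i) PySem.Dict.empty).get? v =
      (PySem.List.index? arr v).map (fun n => (n : Int)) := by
  have he := PySem.List.enumerate_eq_map_pyRange arr 0
  have h := pvDict_fold_get? arr v 0 PySem.Dict.empty
  rw [he, List.foldl_map] at h
  rw [h]
  simp [PySem.Dict.get?_empty]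

-- The break-loop, on a nondecreasing list containing m whose smaller elements all fail the test,
-- returns m's stored index.
lemma pvFindLoop_eq (k m j : Int) (d : PySem.Dict Int Int) :
    ∀ l : List Int, l.Pairwise (· ≤ ·) → m ∈ l →
      (∀ e ∈ l, e < m → ∃ j', d.get? e = some j' ∧ k < j') →
      d.get? m = some j → j ≤ k → pvFindLoop l d k = some j := by
  intro l
  induction l with
  | nil => intro _ hm; cases hm
  | cons e t ih =>
    intro hp hm hfail hgm hjk
    rcases List.pairwise_cons.mp hp with ⟨hle, hpt⟩
    by_cases hem : e < m
    · rcases hfail e (List.mem_cons_self) hem with ⟨j', hj', hkj'⟩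
      have hmt : m ∈ t := by
        rcases List.mem_cons.mp hm with h | h
        · exact absurd h.symm (ne_of_lt hem)
        · exact h
      rw [pvFindLoop, hj']
      show (if j' ≤ k then some j' else pvFindLoop t d k) = some j
      rw [if_neg (by omega)]
      exact ih hpt hmt (fun e' he' h' => hfail e' (List.mem_cons_of_mem _ he') h') hgm hjk
    · have hme : e = m := by
        rcases List.mem_cons.mp hm with h | h
        · exact h.symm
        · exact le_antisymm (hle m h) (not_lt.mp hem)
      subst hme
      rw [pvFindLoop, hgm]
      show (if j ≤ k then some j else pvFindLoop t d k) = some j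
      rw [if_pos hjk]

-- One swap step: positions m and m+1 exchange their elements.
lemma pvSwap_decomp (l : List Int) (m : Nat) (h : m + 1 < l.length) :
    pvSwapStep l ((m + 1 : Nat) : Int) =
      l.take m ++ l[m + 1] :: l[m]'(by omega) :: l.drop (m + 2) := by
  have hm : m < l.length := by omega
  have hcast : ((m + 1 : Nat) : Int) - 1 = (m : Int) := by push_cast; ring
  unfold pvSwapStep
  rw [hcast]
  simp only [PySem.List.pyGetD_natCast, PySem.List.pySetD_natCast]
  rw [List.getD_eq_getElem l 0 h, List.getD_eq_getElem l 0 hm]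
  rw [List.set_eq_take_cons_drop _ hm]
  rw [List.set_eq_take_append_cons_drop]
  have htm : (l.take m).length = m := List.length_take_of_le (by omega)
  rw [if_pos (by simp [List.length_take, List.length_drop]; omega)]
  generalize l[m + 1] = x
  generalize l[m]'(by omega : m < l.length) = y
  have e1 : m + 1 = (l.take m).length + 1 := by omega
  have e2 : m + 1 + 1 = (l.take m).length + 2 := by omega
  rw [e1, e2, List.take_append, List.drop_append, htm]
  have e3 : m + 1 - m = 1 := by omega
  have e5 : m + 1 + 1 - m = 2 := by omega
  rw [e3, e5]
  have e4 : List.drop 2 (x :: l.drop (m + 1)) = l.drop (m + 2) := by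
    show List.drop 1 (l.drop (m + 1)) = l.drop (m + 2)
    rw [List.drop_drop]
  rw [e4]
  have e6 : List.take (m + 1) (l.take m) = l.take m := by
    rw [List.take_take]; congr 1; omega
  have e7 : List.drop (m + 2) (l.take m) = [] := by
    apply List.drop_eq_nil_of_le; omega
  rw [e6, e7]
  simp

-- The whole swap loop rotates the prefix right: element i moves to the front.
lemma pvBubble_eq : ∀ (i : Nat) (l : List Int) (h : i < l.length),
    pvBubble l i = l[i]'h :: (l.take i ++ l.drop (i + 1)) := by
  intro i
  induction i with
  | zero =>
    intro l h
    cases l with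
    | nil => simp at h
    | cons a t => simp [pvBubble]
  | succ m ih =>
    intro l h
    have hm : m < l.length := by omega
    show pvBubble (pvSwapStep l ((m + 1 : Nat) : Int)) m = _
    rw [pvSwap_decomp l m h]
    set x := l[m + 1] with hx
    set y := l[m]'hm with hy
    have htm : (l.take m).length = m := List.length_take_of_le (by omega)
    have hlen : m < (l.take m ++ x :: y :: l.drop (m + 2)).length := by
      simp; omega
    rw [ih _ hlen]
    have g1 : (l.take m ++ x :: y :: l.drop (m + 2))[m]'hlen = x := by
      rw [List.getElem_append_right (by omega)]
      simp [htm]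
    have g2 : (l.take m ++ x :: y :: l.drop (m + 2)).take m = l.take m := by
      rw [List.take_append_of_le_length (by omega)]
      rw [List.take_take]; congr 1; omega
    have g3 : (l.take m ++ x :: y :: l.drop (m + 2)).drop (m + 1) = y :: l.drop (m + 2) := by
      have e1 : m + 1 = (l.take m).length + 1 := by omega
      rw [e1, List.drop_append]
      simp
    rw [g1, g2, g3]
    have g4 : l.take (m + 1) = l.take m ++ [y] := by
      rw [List.take_add_one]
      congr 1
      rw [List.getElem?_eq_getElem hm]
      rfl
    rw [g4]
    simp

-- ===== VERDICT (by name: the statement is the Claim_ definition above) =====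
theorem findMinArray_spec : Claim_equal_findMinArray := by
  intro arr k _hdom hpre
  rcases hpre with ⟨hne, hk⟩
  unfold Spec_findMinArray
  have hpre_eq : PySem.List.slice arr none (some (k + 1)) = arr.take (k + 1).toNat :=
    PySem.List.slice_to arr (by omega)
  set t := (k + 1).toNat with htdef
  set pre := arr.take t with hpredef
  have harrne : 0 < arr.length := List.length_pos_of_ne_nil hne
  have hprene : pre ≠ [] := by
    rw [hpredef, ← List.length_pos_iff, List.length_take]
    omega
  obtain ⟨m, hm⟩ : ∃ m, PySem.List.min? pre (fun x => x) = some m := by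
    cases h : PySem.List.min? pre (fun x => x) with
    | none => exact absurd ((PySem.List.min?_eq_none_iff pre _).mp h) hprene
    | some m => exact ⟨m, rfl⟩
  have hmpre : m ∈ pre := PySem.List.min?_mem hm
  obtain ⟨i, hi⟩ : ∃ i, PySem.List.index? pre m = some i := by
    cases h : PySem.List.index? pre m with
    | none => exact absurd ((PySem.List.index?_eq_none_iff pre m).mp h) (by simp [hmpre])
    | some i => exact ⟨i, rfl⟩
  obtain ⟨hilen, higet, _⟩ := PySem.List.getElem_of_index?_eq_some hi
  have hprelen : pre.length ≤ t := by rw [hpredef]; simp [List.length_take]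
  have hprelen2 : pre.length ≤ arr.length := by rw [hpredef]; simp [List.length_take]
  have hiarr : i < arr.length := lt_of_lt_of_le hilen hprelen2
  -- B's value
  have hB : findMinArray_alt arr k =
      arr[i]'hiarr :: (arr.take i ++ arr.drop (i + 1)) := by
    unfold findMinArray_alt
    simp only [hpre_eq, hm, hi]
    congr 1
    · rw [PySem.List.pyGetD_natCast, List.getD_eq_getElem arr 0 hiarr]
    · congr 1
      · exact PySem.List.slice_to_natCast arr i
      · have : ((i : Int) + 1) = ((i + 1 : Nat) : Int) := by push_cast; ring
        rw [this]
        exact PySem.List.slice_from_natCast arr (i + 1)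
  rw [hB]
  -- A's index dict lookup = first index in arr
  have hidx_arr : PySem.List.index? arr m = some i := by
    have hsplit : arr = pre ++ arr.drop t := by rw [hpredef]; simp
    rw [hsplit, PySem.List.index?_append_of_mem _ hmpre, hi]
  have hik : (i : Int) ≤ k := by
    have : i < t := lt_of_lt_of_le hilen hprelen
    omega
  -- the loop over the sorted list finds exactly index i
  have hloop : pvFindLoop (PySem.List.sorted arr (fun x => x) false)
      ((PySem.List.pyRange 0 (PySem.List.len arr) 1).foldl
        (fun d i => if d.contains (PySem.List.pyGetD arr i 0) then d
                    else d.insert (PySem.List.pyGetD arr i 0) i) PySem.Dict.empty) k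
      = some (i : Int) := by
    apply pvFindLoop_eq k m
    · exact PySem.List.sorted_pairwise arr (fun x => x)
    · exact (PySem.List.mem_sorted arr _ false m).mpr (List.mem_of_mem_take hmpre)
    · intro e he hem
      have hearr : e ∈ arr := (PySem.List.mem_sorted arr _ false e).mp he
      obtain ⟨ne, hne_eq⟩ : ∃ ne, PySem.List.index? arr e = some ne := by
        cases h : PySem.List.index? arr e with
        | none => exact absurd ((PySem.List.index?_eq_none_iff arr e).mp h) (by simp [hearr])
        | some ne => exact ⟨ne, rfl⟩
      refine ⟨(ne : Int), by rw [pvDict_get?, hne_eq]; rfl, ?_⟩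
      by_contra hcon
      have hnek : ne < t := by omega
      obtain ⟨hne_lt, hne_get, _⟩ := PySem.List.getElem_of_index?_eq_some hne_eq
      have hepre : e ∈ pre := by
        rw [hpredef]
        have : (arr.take t)[ne]'(by simp [List.length_take]; omega) = arr[ne]'hne_lt :=
          List.getElem_take
        rw [← hne_get, ← this]
        exact List.getElem_mem _
      have := PySem.List.min?_isMin hm e hepre
      simp at this
      omega
    · rw [pvDict_get?, hidx_arr]; rfl
    · exact hik
  -- assemble A
  show findMinArray arr k = _
  unfold findMinArray
  simp only [hloop, Int.toNat_natCast]
  exact pvBubble_eq i arr hiarr
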